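-- pv_equiv track=rewrite | github.com/LorenzLorentz/Ant-Game | AI/ai_main.py | _ops_to_str
-- ===== SOURCE A (Python) =====
-- from typing import Any, List, Optional
--
-- def _ops_to_str(ops: List[List[int]]) -> str:
--     lines: List[str] = []
--     for op in ops:
--         if not op:
--             continue
--         lines.append(" ".join(str(x) for x in op))
--         if op[0] == 8:
--             break
--     if not lines or lines[-1].split()[0] != "8":
--         lines.append("8")
--     return "\n".join(lines) + "\n"
-- ===== SOURCE B (Python) =====
-- from typing import List
--
--
-- def _ops_to_str(ops: List[List[int]]) -> str:
--     out = "8\n"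
--     for op in reversed(ops):
--         if not op:
--             continue
--         line = " ".join(map(str, op)) + "\n"
--         out = line if op[0] == 8 else line + out
--     return out
-- ===== Notes on version B (the rewrite author's own statement) =====
-- stated objective: alternative
-- what changed: Builds the output string back-to-front in a single reversed-order pass with a string accumulator seeded '8\n' (a terminator op resets the accumulator), eliminating A's list of lines, its join, its break, and its string-level re-parse of the last line (split()[0] != '8').
import Mathlib
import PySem

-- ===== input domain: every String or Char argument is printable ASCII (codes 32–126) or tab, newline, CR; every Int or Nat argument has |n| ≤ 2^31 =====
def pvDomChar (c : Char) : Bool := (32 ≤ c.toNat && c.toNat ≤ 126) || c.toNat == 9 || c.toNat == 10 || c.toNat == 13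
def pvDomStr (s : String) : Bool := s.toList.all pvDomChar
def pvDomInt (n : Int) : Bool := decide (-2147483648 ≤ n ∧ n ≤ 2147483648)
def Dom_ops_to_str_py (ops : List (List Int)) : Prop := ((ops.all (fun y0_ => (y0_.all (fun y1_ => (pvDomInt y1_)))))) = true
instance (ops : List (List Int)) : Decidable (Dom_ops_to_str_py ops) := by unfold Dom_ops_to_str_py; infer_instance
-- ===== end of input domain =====

-- B builds the output string back-to-front: a single reversed-order pass with a string
-- accumulator seeded "8\n"; no list of lines, no join, no re-parse of the last line
-- (objective: alternative).

-- ===== PORT A =====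
-- " ".join(str(x) for x in op)
def pvOpLine (op : List Int) : String := PySem.Str.join " " (op.map PySem.Int.toStr)

-- A's 'for op in ops' loop: skip empty ops, append the formatted line, break after op[0] == 8
def pvALoop : List (List Int) → List String
  | [] => []
  | op :: rest =>
    match op with
    | [] => pvALoop rest
    | h :: t =>
      if h = 8 then [pvOpLine (h :: t)]
      else pvOpLine (h :: t) :: pvALoop rest

def ops_to_str_py (ops : List (List Int)) : String :=
  let lines := pvALoop ops
  let lines2 :=
    if lines = [] ∨ PySem.List.pyGetD (PySem.Str.split₀ (PySem.List.pyGetD lines (-1) "")) 0 "" ≠ "8"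
    then lines ++ ["8"] else lines
  PySem.Str.join "\n" lines2 ++ "\n"

-- ===== PORT B =====
-- one step of B's 'for op in reversed(ops)' loop body
def pvBStep (acc : String) (op : List Int) : String :=
  match op with
  | [] => acc
  | h :: t =>
    let line := PySem.Str.join " " ((h :: t).map PySem.Int.toStr) ++ "\n"
    if h = 8 then line else line ++ acc

def ops_to_str_py_alt (ops : List (List Int)) : String :=
  ops.reverse.foldl pvBStep "8\n"

-- ===== PRECONDITION & SPEC =====
def Spec_ops_to_str_py (ops : List (List Int)) (out : String) : Prop := out = ops_to_str_py_alt ops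
instance (ops : List (List Int)) (out : String) : Decidable (Spec_ops_to_str_py ops out) := by unfold Spec_ops_to_str_py; infer_instance

-- ===== CLAIM (what is proved, stated in full; the proofs are below) =====
def Claim_equal_ops_to_str_py : Prop := ∀ (ops : List (List Int)), Dom_ops_to_str_py ops → Spec_ops_to_str_py ops (ops_to_str_py ops)

-- ===== LEMMAS AND PROOFS =====

-- A's post-processing of the collected lines
def pvFinish (lines : List String) : String :=
  PySem.Str.join "\n"
    (if lines = [] ∨ PySem.List.pyGetD (PySem.Str.split₀ (PySem.List.pyGetD lines (-1) "")) 0 "" ≠ "8"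
     then lines ++ ["8"] else lines) ++ "\n"

theorem pvPortA_eq_finish (ops : List (List Int)) :
    ops_to_str_py ops = pvFinish (pvALoop ops) := rfl

-- ----- string facts -----

theorem pv_isspace_of_digit (c : Char) (hd : c.isDigit = true) : PySem.Chars.isspace c = false := by
  simp only [Char.isDigit, decide_eq_true_eq, Bool.and_eq_true] at hd
  have h1 : ('0'.val).toNat ≤ (c.val).toNat := UInt32.le_iff_toNat_le.mp hd.1
  have h2 : (c.val).toNat ≤ ('9'.val).toNat := UInt32.le_iff_toNat_le.mp hd.2
  have hv : c.toNat = (c.val).toNat := rfl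
  have h0 : 48 ≤ c.toNat ∧ c.toNat ≤ 57 := by rw [hv]; exact ⟨h1, h2⟩
  simp only [PySem.Chars.isspace]
  simp only [Bool.or_eq_false_iff, Bool.and_eq_false_iff, decide_eq_false_iff_not]
  omega

theorem pv_toChars_nonspace (n : Int) : ∀ c ∈ PySem.Int.toChars n, PySem.Chars.isspace c = false := by
  intro c hc
  unfold PySem.Int.toChars at hc
  split at hc
  · rcases List.mem_cons.1 hc with rfl | hc
    · decide
    · exact pv_isspace_of_digit c (Nat.isDigit_of_mem_toDigits (by norm_num) (by norm_num) hc)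
  · exact pv_isspace_of_digit c (Nat.isDigit_of_mem_toDigits (by norm_num) (by norm_num) hc)

theorem pv_toChars_ne_nil (n : Int) : PySem.Int.toChars n ≠ [] := by
  unfold PySem.Int.toChars
  split
  · simp
  · have := @Nat.length_toDigits_pos 10 n.toNat
    intro h; rw [h] at this; simp at this

theorem pv_toChars_eq_eight_iff (n : Int) : PySem.Int.toChars n = ['8'] ↔ n = 8 := by
  constructor
  · intro h
    unfold PySem.Int.toChars at h
    split at h
    · have := @Nat.length_toDigits_pos 10 n.natAbs
      cases hD : Nat.toDigits 10 n.natAbs with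
      | nil => rw [hD] at this; simp at this
      | cons a l => rw [hD] at h; simp at h
    · rename_i hn
      have hlen : (Nat.toDigits 10 n.toNat).length ≤ 1 := by rw [h]; simp
      have hlt : n.toNat < 10 := by
        have := (Nat.length_toDigits_le_iff (b := 10) (n := n.toNat) (by norm_num) (by norm_num)).1 hlen
        simpa using this
      rw [Nat.toDigits_of_lt_base hlt] at h
      have hdc : (n.toNat).digitChar = '8' := by simpa using h
      have h8 : n.toNat = 8 := by
        interval_cases h' : n.toNat <;> simp_all [Nat.digitChar]
      omega
  · intro h; subst h; rfl

theorem pv_go_acc (s cur : List Char) (acc : List (List Char)) :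
    PySem.Chars.split₀.go s cur acc = acc.reverse ++ PySem.Chars.split₀.go s cur [] := by
  induction s generalizing cur acc with
  | nil =>
    simp only [PySem.Chars.split₀.go]
    by_cases hc : cur.isEmpty <;> simp [hc]
  | cons c rest ih =>
    simp only [PySem.Chars.split₀.go]
    by_cases hs : PySem.Chars.isspace c
    · by_cases hc : cur.isEmpty
      · simp only [hs, hc, if_true]
        exact ih [] acc
      · simp only [hs, hc, if_true, if_false, Bool.false_eq_true]
        rw [ih [] (cur.reverse :: acc), ih [] [cur.reverse]]
        simp
    · simp only [hs, Bool.false_eq_true, if_false]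
      rw [ih (c :: cur) acc]

theorem pv_go_word (w : List Char) (hw : ∀ c ∈ w, PySem.Chars.isspace c = false)
    (s cur : List Char) :
    PySem.Chars.split₀.go (w ++ s) cur [] = PySem.Chars.split₀.go s (w.reverse ++ cur) [] := by
  induction w generalizing cur with
  | nil => simp
  | cons c rest ih =>
    have hc : PySem.Chars.isspace c = false := hw c (by simp)
    simp only [List.cons_append, PySem.Chars.split₀.go, hc, Bool.false_eq_true, if_false]
    rw [ih (fun d hd => hw d (by simp [hd])) (c :: cur)]
    simp

theorem pv_split_first (w r : List Char) (hne : w ≠ [])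
    (hw : ∀ c ∈ w, PySem.Chars.isspace c = false)
    (hr : r = [] ∨ ∃ r', r = ' ' :: r') :
    ∃ rest, PySem.Chars.split₀ (w ++ r) = w :: rest := by
  unfold PySem.Chars.split₀
  rw [pv_go_word w hw r []]
  rcases hr with rfl | ⟨r', rfl⟩
  · refine ⟨[], ?_⟩
    simp only [PySem.Chars.split₀.go]
    have : (w.reverse ++ []).isEmpty = false := by simp [hne]
    simp [hne]
  · simp only [PySem.Chars.split₀.go]
    have hsp : PySem.Chars.isspace ' ' = true := by decide
    have : (w.reverse ++ []).isEmpty = false := by simp [hne]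
    simp only [hsp, this, if_true, if_false, Bool.false_eq_true]
    rw [pv_go_acc]
    exact ⟨PySem.Chars.split₀.go r' [] [], by simp⟩

theorem pv_first_word_aux (s : String) (h : Int) (r : List Char)
    (hs : s.toList = PySem.Int.toChars h ++ r) (hr : r = [] ∨ ∃ r', r = ' ' :: r') :
    PySem.List.pyGetD (PySem.Str.split₀ s) 0 "" = PySem.Int.toStr h := by
  obtain ⟨rest, hsplit⟩ := pv_split_first (PySem.Int.toChars h) r (pv_toChars_ne_nil h)
      (pv_toChars_nonspace h) hr
  have hmap : (PySem.Str.split₀ s).map String.toList = PySem.Int.toChars h :: rest := by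
    rw [PySem.Str.split₀_map_toList, hs, hsplit]
  rw [List.map_eq_cons_iff] at hmap
  obtain ⟨x, xs, heq, hx, -⟩ := hmap
  rw [heq, PySem.List.pyGetD_zero_cons]
  have : x.toList = (PySem.Int.toStr h).toList := by rw [hx, PySem.Int.toList_toStr]
  exact String.toList_inj.mp this

-- first word of the formatted line of a nonempty op is str(op[0])
theorem pv_first_word (h : Int) (t : List Int) :
    PySem.List.pyGetD (PySem.Str.split₀ (pvOpLine (h :: t))) 0 "" = PySem.Int.toStr h := by
  unfold pvOpLine
  cases t with
  | nil =>
    refine pv_first_word_aux _ h [] ?_ (Or.inl rfl)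
    rw [PySem.Str.toList_join]
    simp [PySem.Chars.join_singleton, PySem.Int.toList_toStr]
  | cons a t' =>
    refine pv_first_word_aux _ h
      (' ' :: PySem.Chars.join [' '] ((a :: t').map (fun n => PySem.Int.toChars n))) ?_ (Or.inr ⟨_, rfl⟩)
    rw [PySem.Str.toList_join]
    simp only [List.map_cons, List.map_map]
    rw [PySem.Chars.join_cons_cons]
    simp [PySem.Int.toList_toStr, Function.comp_def]

theorem pv_first_word_eq_eight_iff (h : Int) (t : List Int) :
    (PySem.List.pyGetD (PySem.Str.split₀ (pvOpLine (h :: t))) 0 "" = "8") ↔ h = 8 := by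
  rw [pv_first_word]
  constructor
  · intro he
    have : (PySem.Int.toStr h).toList = "8".toList := by rw [he]
    rw [PySem.Int.toList_toStr] at this
    exact (pv_toChars_eq_eight_iff h).1 this
  · intro he; subst he; rfl

-- ----- join / finish facts -----

theorem pv_join_singleton (l : String) : PySem.Str.join "\n" [l] = l := by
  apply String.toList_inj.mp
  rw [PySem.Str.toList_join]
  simp [PySem.Chars.join_singleton]

theorem pv_join_cons (l m : String) (L : List String) :
    PySem.Str.join "\n" (l :: m :: L) = l ++ "\n" ++ PySem.Str.join "\n" (m :: L) := by
  apply String.toList_inj.mp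
  rw [PySem.Str.toList_join]
  simp only [List.map_cons]
  rw [PySem.Chars.join_cons_cons]
  simp [PySem.Str.toList_join]

theorem pv_finish_nil : pvFinish [] = "8\n" := by
  unfold pvFinish
  rw [if_pos (Or.inl rfl), List.nil_append, pv_join_singleton]
  decide

theorem pv_finish_term (l : String)
    (hl : PySem.List.pyGetD (PySem.Str.split₀ l) 0 "" = "8") :
    pvFinish [l] = l ++ "\n" := by
  unfold pvFinish
  rw [if_neg, pv_join_singleton]
  push Not
  refine ⟨by simp, ?_⟩
  have hlast : PySem.List.pyGetD [l] (-1) "" = l := by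
    rw [PySem.List.pyGetD_neg_one [l] "" (by simp)]
    simp
  rw [hlast]
  exact hl

theorem pv_finish_cons (l : String) (L : List String)
    (hl : PySem.List.pyGetD (PySem.Str.split₀ l) 0 "" ≠ "8") :
    pvFinish (l :: L) = l ++ "\n" ++ pvFinish L := by
  unfold pvFinish
  cases L with
  | nil =>
    have h1 : PySem.List.pyGetD [l] (-1) "" = l := by
      rw [PySem.List.pyGetD_neg_one [l] "" (by simp)]; simp
    rw [if_pos, if_pos (Or.inl rfl)]
    · simp only [List.cons_append, List.nil_append]
      rw [pv_join_cons, pv_join_singleton, String.append_assoc]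
    · rw [h1]; exact Or.inr hl
  | cons m M =>
    have hlast : PySem.List.pyGetD (l :: m :: M) (-1) "" = PySem.List.pyGetD (m :: M) (-1) "" := by
      rw [PySem.List.pyGetD_neg_one (l :: m :: M) "" (by simp),
          PySem.List.pyGetD_neg_one (m :: M) "" (by simp)]
      simp [List.getLast_cons]
    rw [hlast]
    by_cases hc : PySem.List.pyGetD (PySem.Str.split₀ (PySem.List.pyGetD (m :: M) (-1) "")) 0 "" ≠ "8"
    · rw [if_pos (Or.inr hc), if_pos (Or.inr hc)]
      simp only [List.cons_append]
      rw [pv_join_cons]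
      simp [String.append_assoc]
    · rw [if_neg (by simpa using hc), if_neg (by simpa using hc)]
      rw [pv_join_cons]
      simp [String.append_assoc]

-- ----- main equivalence: A's finish of its loop = B's right fold -----

theorem pv_main (ops : List (List Int)) :
    pvFinish (pvALoop ops) = ops.foldr (fun op acc => pvBStep acc op) "8\n" := by
  induction ops with
  | nil => simpa [pvALoop] using pv_finish_nil
  | cons op rest ih =>
    cases op with
    | nil => simpa [pvALoop, List.foldr_cons, pvBStep] using ih
    | cons h t =>
      by_cases h8 : h = 8
      · subst h8
        have hA : pvALoop (((8 : Int) :: t) :: rest) = [pvOpLine (8 :: t)] := by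
          simp [pvALoop]
        rw [hA, List.foldr_cons,
            pv_finish_term _ ((pv_first_word_eq_eight_iff 8 t).2 rfl)]
        simp [pvBStep, pvOpLine]
      · have hA : pvALoop ((h :: t) :: rest) = pvOpLine (h :: t) :: pvALoop rest := by
          simp [pvALoop, h8]
        rw [hA, List.foldr_cons,
            pv_finish_cons _ _ (fun hc => h8 ((pv_first_word_eq_eight_iff h t).1 hc)), ih]
        simp [pvBStep, h8, pvOpLine, String.append_assoc]

-- ===== VERDICT (by name: the statement is the Claim_ definition above) =====
theorem ops_to_str_py_spec : Claim_equal_ops_to_str_py := by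
  intro ops _
  unfold Spec_ops_to_str_py ops_to_str_py_alt
  rw [List.foldl_reverse, pvPortA_eq_finish, pv_main]
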